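-- pv_equiv track=rewrite | github.com/math-fairy/Digital_Logic_Design | petrick_method.py | binding
-- ===== SOURCE A (Python) =====
-- def binding(a,b):   #한자리수만 다른 수끼리 묶기
--     char = ''
--     cnt = 0
--     for num in range(len(a)):
--         if a[num] == b[num]:
--             char += a[num]
--         else:
--             char += '-'
--             cnt += 1
--
--     if cnt > 1:
--         return None
--     elif cnt == 1:
--         return char
-- ===== SOURCE B (Python) =====
-- def binding(a, b):
--     diffs = [i for i in range(len(a)) if a[i] != b[i]]
--     if len(diffs) != 1:
--         return None
--     i = diffs[0]
--     return a[:i] + '-' + a[i+1:]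
-- ===== Notes on version B (the rewrite author's own statement) =====
-- stated objective: simpler
-- what changed: B collects the differing indices in one comprehension and, only in the single-difference case, builds the result by slicing around that index, instead of accumulating the whole output character by character with a running mismatch counter (avoids per-character string concatenation).
import Mathlib
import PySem

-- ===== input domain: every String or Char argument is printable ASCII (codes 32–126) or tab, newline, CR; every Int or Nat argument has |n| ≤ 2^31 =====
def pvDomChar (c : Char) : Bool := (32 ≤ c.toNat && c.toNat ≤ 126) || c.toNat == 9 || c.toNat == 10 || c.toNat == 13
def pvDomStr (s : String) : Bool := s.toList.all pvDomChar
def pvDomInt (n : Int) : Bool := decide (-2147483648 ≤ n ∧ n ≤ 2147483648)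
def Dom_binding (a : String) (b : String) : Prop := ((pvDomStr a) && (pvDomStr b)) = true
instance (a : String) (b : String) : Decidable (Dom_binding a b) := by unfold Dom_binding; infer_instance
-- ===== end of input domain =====

-- ===== PORT A =====
-- A accumulates the output char-by-char with a running mismatch counter.
-- Under Pre_binding every index is in range, so `getD` with a dummy default is exact.
def binding (a : String) (b : String) : Option String :=
  let la := a.toList
  let lb := b.toList
  let st := (List.range la.length).foldl
    (fun (p : List Char × Int) num =>
      if la.getD num ' ' == lb.getD num ' ' then (p.1 ++ [la.getD num ' '], p.2)
      else (p.1 ++ ['-'], p.2 + 1)) ([], 0)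
  if st.2 > 1 then none
  else if st.2 = 1 then some (String.mk st.1)
  else none

-- ===== PORT B =====
-- B lists the differing indices, then slices around the unique one.
-- a[:i] = take i and a[i+1:] = drop (i+1) since i ≥ 0 (exact for nonnegative slice bounds).
def binding_alt (a : String) (b : String) : Option String :=
  let la := a.toList
  let lb := b.toList
  let diffs := (List.range la.length).filter (fun i => la.getD i ' ' != lb.getD i ' ')
  match diffs with
  | [i] => some (String.mk (la.take i ++ '-' :: la.drop (i + 1)))
  | _ => none

-- ===== PRECONDITION & SPEC =====
-- Pre_ excludes inputs with len(b) < len(a), on which A raises IndexError (and B does too).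
def Pre_binding (a : String) (b : String) : Prop := a.toList.length ≤ b.toList.length
instance (a : String) (b : String) : Decidable (Pre_binding a b) := by unfold Pre_binding; infer_instance
def pvWitness_binding : String × String := ("100", "110")

def Spec_binding (a : String) (b : String) (out : Option String) : Prop := out = binding_alt a b
instance (a : String) (b : String) (out : Option String) : Decidable (Spec_binding a b out) := by unfold Spec_binding; infer_instance

-- ===== CLAIM (what is proved, stated in full; the proofs are below) =====
def Claim_equal_binding : Prop := ∀ (a : String) (b : String), Dom_binding a b → Pre_binding a b → Spec_binding a b (binding a b)

-- ===== LEMMAS AND PROOFS =====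

-- A's loop, characterised: the accumulated string is a map over the indices and the
-- counter counts the differing indices.
theorem binding_foldl_char (la lb : List Char) (l : List Nat) (acc : List Char × Int) :
    l.foldl (fun (p : List Char × Int) num =>
      if la.getD num ' ' == lb.getD num ' ' then (p.1 ++ [la.getD num ' '], p.2)
      else (p.1 ++ ['-'], p.2 + 1)) acc
    = (acc.1 ++ l.map (fun i => if la.getD i ' ' == lb.getD i ' ' then la.getD i ' ' else '-'),
       acc.2 + ((l.filter (fun i => la.getD i ' ' != lb.getD i ' ')).length : Int)) := by
  induction l generalizing acc with
  | nil => simp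
  | cons x xs ih =>
    rw [List.foldl_cons]
    by_cases h : la.getD x ' ' = lb.getD x ' '
    · rw [if_pos (beq_iff_eq.mpr h), ih]
      have h' : la[x]?.getD ' ' = lb[x]?.getD ' ' := by simpa [List.getD] using h
      refine Prod.ext (by simp [h']) ?_
      simp [h', List.getD]
    · rw [if_neg (fun hb => h (eq_of_beq hb)), ih]
      have h' : ¬ la[x]?.getD ' ' = lb[x]?.getD ' ' := by simpa [List.getD] using h
      refine Prod.ext (by simp [h']) ?_
      simp only [List.filter_cons]
      rw [if_pos (bne_iff_ne.mpr h)]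
      simp only [List.length_cons]
      push_cast
      omega

-- If the unique differing index is i, A's accumulated string is B's sliced string.
theorem binding_map_eq_slice (la lb : List Char) (i : Nat)
    (hd : (List.range la.length).filter (fun j => la.getD j ' ' != lb.getD j ' ') = [i]) :
    (List.range la.length).map (fun j => if la.getD j ' ' == lb.getD j ' ' then la.getD j ' ' else '-')
    = la.take i ++ '-' :: la.drop (i + 1) := by
  have hi : i ∈ (List.range la.length).filter (fun j => la.getD j ' ' != lb.getD j ' ') := by
    rw [hd]; exact List.mem_singleton.mpr rfl
  rw [List.mem_filter, List.mem_range] at hi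
  obtain ⟨hilt, hine⟩ := hi
  have hine' : ¬ la.getD i ' ' = lb.getD i ' ' := bne_iff_ne.mp hine
  have hmem : ∀ j, j < la.length → j ≠ i → la.getD j ' ' = lb.getD j ' ' := by
    intro j hj hji
    by_contra hne
    have : j ∈ (List.range la.length).filter (fun k => la.getD k ' ' != lb.getD k ' ') := by
      rw [List.mem_filter, List.mem_range]
      exact ⟨hj, bne_iff_ne.mpr hne⟩
    rw [hd] at this
    exact hji (List.mem_singleton.mp this)
  have htake : (la.take i).length = i := by simp [Nat.le_of_lt hilt]
  apply List.ext_getElem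
  · simp; omega
  · intro j hj1 hj2
    have hjn : j < la.length := by simpa using hj1
    rw [List.getElem_map, List.getElem_range]
    by_cases hji : j = i
    · subst hji
      rw [if_neg (fun hb => hine' (eq_of_beq hb))]
      rw [List.getElem_append_right (by omega)]
      simp [List.length_take, Nat.min_eq_left (Nat.le_of_lt hilt)]
    · rw [if_pos (beq_iff_eq.mpr (hmem j hjn hji))]
      have hget : la.getD j ' ' = la[j] := List.getD_eq_getElem la ' ' hjn
      rw [hget]
      by_cases hlt : j < i
      · rw [List.getElem_append_left (by omega)]
        simp [List.getElem_take]
      · have hgt : i < j := by omega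
        rw [List.getElem_append_right (by omega)]
        simp only [List.length_take, Nat.min_eq_left (Nat.le_of_lt hilt)]
        obtain ⟨k, hk⟩ : ∃ k, j - i = k + 1 := ⟨j - i - 1, by omega⟩
        simp only [hk, List.getElem_cons_succ, List.getElem_drop]
        congr 1
        omega

-- ===== VERDICT (by name: the statement is the Claim_ definition above) =====
theorem binding_spec : Claim_equal_binding := by
  intro a b _ _
  unfold Spec_binding binding binding_alt
  simp only [binding_foldl_char, List.nil_append, Int.zero_add]
  match hcase : (List.range a.toList.length).filter (fun i => a.toList.getD i ' ' != b.toList.getD i ' ') with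
  | [] => simp
  | [i] =>
    rw [if_neg (by simp), if_pos (by simp)]
    rw [binding_map_eq_slice a.toList b.toList i hcase]
  | i :: j :: rest =>
    rw [if_pos (by simp)]
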